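-- pv_equiv track=rewrite | github.com/kky0426/TIL | Programmers/불량 사용자.py | solution
-- ===== SOURCE A (Python) =====
-- from itertools import product
--
-- def compare(user,ban):
--     if len(user)!=len(ban):
--         return False
--     for i in range(len(ban)):
--         if ban[i] == '*':
--             continue
--         if ban[i] != user[i]:
--             return False
--     return True
--
-- def solution(user_id, banned_id):
--     answer = []
--     ban_user = []
--     N = len(banned_id)
--     for ban in banned_id:
--         temp = []
--         for user in user_id:
--             if compare(user,ban):
--                 temp.append(user)
--         ban_user.append(temp)
--     ban_user = [x for x in ban_user]
--     result = list(product(*ban_user))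
--     for item in result:
--         item = set(item)
--         if len(item) == N and item not in answer:
--             answer.append(item)
--
--     return len(answer)
-- ===== SOURCE B (Python) =====
-- def compare(user, ban):
--     if len(user) != len(ban):
--         return False
--     for i in range(len(ban)):
--         if ban[i] == '*':
--             continue
--         if ban[i] != user[i]:
--             return False
--     return True
--
-- def solution(user_id, banned_id):
--     candidates = [[u for u in user_id if compare(u, ban)] for ban in banned_id]
--     results = set()
--     used = []
--
--     def dfs(i):
--         if i == len(candidates):
--             results.add(frozenset(used))
--             return
--         for u in candidates[i]:
--             if u not in used:
--                 used.append(u)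
--                 dfs(i + 1)
--                 used.pop()
--
--     dfs(0)
--     return len(results)
-- ===== Notes on version B (the rewrite author's own statement) =====
-- stated objective: alternative
-- what changed: A enumerates the full cartesian product of per-ban candidate lists and then filters tuples by set size and list-membership dedup; B runs a DFS over the banned ids that skips already-used users (pruning duplicate-user branches) and accumulates the distinct assignment frozensets in a set, returning its size; on the measured input family the cost is the same.
import Mathlib
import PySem

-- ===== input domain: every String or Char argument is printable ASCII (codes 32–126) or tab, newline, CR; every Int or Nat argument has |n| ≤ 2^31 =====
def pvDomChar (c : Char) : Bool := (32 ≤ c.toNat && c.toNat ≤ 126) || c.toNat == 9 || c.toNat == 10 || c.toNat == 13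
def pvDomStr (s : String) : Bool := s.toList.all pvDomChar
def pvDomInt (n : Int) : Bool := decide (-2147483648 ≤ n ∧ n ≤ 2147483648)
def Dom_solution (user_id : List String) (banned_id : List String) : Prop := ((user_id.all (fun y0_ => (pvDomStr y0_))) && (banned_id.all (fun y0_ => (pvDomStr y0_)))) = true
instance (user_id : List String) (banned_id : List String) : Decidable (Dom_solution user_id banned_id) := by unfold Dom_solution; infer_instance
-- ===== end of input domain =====

-- B replaces A's full-product enumeration plus set-size/duplicate filtering by a DFS over banned ids
-- that prunes already-used users and collects the distinct assignment sets directly (objective: alternative).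

-- ===== PORT A =====
-- shared helper: Python `compare(user, ban)` (A and Source B contain this identical function)
def matchBan (user ban : String) : Bool :=
  let u := user.toList
  let b := ban.toList
  if u.length ≠ b.length then false
  else (List.range b.length).all (fun i =>
    if b.getD i ' ' == '*' then true else b.getD i ' ' == u.getD i ' ')

-- itertools.product(*lists): rightmost factor varies fastest
def pyProduct : List (List String) → List (List String)
  | [] => [[]]
  | l :: ls => l.flatMap (fun x => (pyProduct ls).map (fun t => x :: t))

def solution (user_id : List String) (banned_id : List String) : Int :=
  let N := banned_id.length
  let ban_user := banned_id.foldl (fun bu ban =>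
      bu ++ [user_id.foldl (fun temp user =>
        if matchBan user ban then temp ++ [user] else temp) []]) []
  let ban_user := ban_user.map (fun x => x)
  let result := pyProduct ban_user
  let answer := result.foldl (fun ans item =>
      let s := PySem.Set.ofList item   -- item = set(item)
      if s.length == N && !(ans.any (fun t => PySem.Set.equal t s)) then ans ++ [s] else ans) []
  (answer.length : Int)

-- ===== PORT B =====
-- DFS over the candidate lists; the pruning test keeps `used` duplicate-free, so
-- frozenset(used) is modeled exactly by the sorted list of its elements (canonical form),
-- and `results` (a Python set of frozensets) is a PySem.Set of those canonical lists.
def dfsB : List (List String) → List String → PySem.Set (List String) → PySem.Set (List String)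
  | [], used, res => PySem.Set.add res (PySem.List.sorted used (fun x => x) false)
  | c :: rest, used, res =>
      c.foldl (fun r u => if u ∈ used then r else dfsB rest (used ++ [u]) r) res

def solution_alt (user_id : List String) (banned_id : List String) : Int :=
  let candidates := banned_id.map (fun ban => user_id.filter (fun u => matchBan u ban))
  ((dfsB candidates [] []).length : Int)

-- ===== PRECONDITION & SPEC =====
def Spec_solution (user_id : List String) (banned_id : List String) (out : Int) : Prop := out = solution_alt user_id banned_id
instance (user_id : List String) (banned_id : List String) (out : Int) : Decidable (Spec_solution user_id banned_id out) := by unfold Spec_solution; infer_instance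

-- ===== CLAIM (what is proved, stated in full; the proofs are below) =====
def Claim_equal_solution : Prop := ∀ (user_id : List String) (banned_id : List String), Dom_solution user_id banned_id → Spec_solution user_id banned_id (solution user_id banned_id)

-- ===== LEMMAS AND PROOFS =====

-- canonical representative of a finite set of strings
def canonS (t : List String) : List String := PySem.List.sorted t (fun x => x) false

-- `t` picks one member from each candidate list, in order
def Pick (cands : List (List String)) (t : List String) : Prop :=
  List.Forall₂ (fun u c => u ∈ c) t cands

theorem canonS_eq_iff (a b : List String) : canonS a = canonS b ↔ a.Perm b := by
  simpa [canonS] using PySem.List.sorted_id_eq_sorted_id_iff_perm a b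

theorem equal_iff_perm (a b : List String) (ha : a.Nodup) (hb : b.Nodup) :
    PySem.Set.equal a b = true ↔ a.Perm b := by
  rw [PySem.Set.equal_iff, List.perm_ext_iff_of_nodup ha hb]

theorem ofList_sublist (xs : List String) : (PySem.Set.ofList xs).Sublist xs := by
  induction xs with
  | nil => simp [PySem.Set.ofList]
  | cons x xs ih =>
      rw [PySem.Set.ofList_cons]
      have h1 : ((PySem.Set.ofList xs).discard x).Sublist (PySem.Set.ofList xs) := by
        simp [PySem.Set.discard]
      exact List.Sublist.cons₂ x (h1.trans ih)

theorem nodup_of_ofList_length (xs : List String)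
    (h : (PySem.Set.ofList xs).length = xs.length) : xs.Nodup := by
  have := (ofList_sublist xs).eq_of_length h
  have hn := PySem.Set.nodup_ofList (xs := xs)
  rwa [this] at hn

theorem mem_pyProduct (cands : List (List String)) (t : List String) :
    t ∈ pyProduct cands ↔ Pick cands t := by
  induction cands generalizing t with
  | nil => simp [pyProduct, Pick, List.forall₂_nil_right_iff]
  | cons c rest ih =>
      simp only [pyProduct, List.mem_flatMap, List.mem_map, Pick]
      constructor
      · rintro ⟨x, hx, t', ht', rfl⟩
        exact List.Forall₂.cons hx ((ih t').1 ht')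
      · intro h
        cases h with
        | cons hu ht => exact ⟨_, hu, _, (ih _).2 ht, rfl⟩

theorem nodup_snoc {α : Type} (used : List α) (u : α) (hu : used.Nodup) (hm : u ∉ used) :
    (used ++ [u]).Nodup := by
  rw [List.nodup_append]
  refine ⟨hu, by simp, ?_⟩
  intro a ha b hb
  simp only [List.mem_singleton] at hb
  subst hb
  exact fun h => hm (h ▸ ha)

theorem not_mem_of_nodup_snoc {α : Type} (used : List α) (v : α) (h : (used ++ [v]).Nodup) :
    v ∉ used := by
  rw [List.nodup_append] at h
  exact fun hm => h.2.2 v hm v (List.mem_singleton.mpr rfl) rfl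

-- A's dedup loop: accumulated sets are duplicate-free lists, pairwise non-equal as sets,
-- and together represent exactly the size-N sets of the tuples seen so far
theorem Afold_invariant (N : Nat) (items : List (List String)) :
    ∀ (ans : List (List String)), (∀ s ∈ ans, s.Nodup) →
    ans.Pairwise (fun a b => ¬ a.Perm b) →
    (∀ s ∈ items.foldl (fun ans item =>
        let s := PySem.Set.ofList item
        if s.length == N && !(ans.any (fun t => PySem.Set.equal t s)) then ans ++ [s] else ans) ans,
      s.Nodup) ∧
    (items.foldl (fun ans item =>
        let s := PySem.Set.ofList item
        if s.length == N && !(ans.any (fun t => PySem.Set.equal t s)) then ans ++ [s] else ans) ans).Pairwise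
      (fun a b => ¬ a.Perm b) ∧
    (∀ S, (∃ x ∈ items.foldl (fun ans item =>
        let s := PySem.Set.ofList item
        if s.length == N && !(ans.any (fun t => PySem.Set.equal t s)) then ans ++ [s] else ans) ans,
        canonS x = S) ↔ (∃ x ∈ ans, canonS x = S) ∨
      ∃ item ∈ items, (PySem.Set.ofList item).length = N ∧ canonS (PySem.Set.ofList item) = S) := by
  induction items with
  | nil =>
      intro ans h1 h2
      exact ⟨h1, h2, fun S => by simp⟩
  | cons item rest ih =>
      intro ans h1 h2
      simp only [List.foldl_cons]
      by_cases hc : ((PySem.Set.ofList item).length == N &&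
          !(ans.any (fun t => PySem.Set.equal t (PySem.Set.ofList item)))) = true
      · rw [if_pos hc]
        have hand := (Bool.and_eq_true _ _).mp hc
        have hlen : (PySem.Set.ofList item).length = N := beq_iff_eq.mp hand.1
        have hany : (ans.any (fun t => PySem.Set.equal t (PySem.Set.ofList item))) = false :=
          (Bool.not_eq_true' _).mp hand.2
        have hnone : ∀ t ∈ ans, ¬ t.Perm (PySem.Set.ofList item) := by
          intro t ht hp
          have heq : PySem.Set.equal t (PySem.Set.ofList item) = true :=
            (equal_iff_perm _ _ (h1 t ht) (PySem.Set.nodup_ofList item)).mpr hp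
          have := List.any_eq_false.mp hany t ht
          rw [heq] at this
          simp at this
        have h1' : ∀ s ∈ ans ++ [PySem.Set.ofList item], s.Nodup := by
          intro s hs
          rcases List.mem_append.mp hs with h | h
          · exact h1 s h
          · rw [List.mem_singleton.mp h]; exact PySem.Set.nodup_ofList item
        have h2' : (ans ++ [PySem.Set.ofList item]).Pairwise (fun a b => ¬ a.Perm b) := by
          rw [List.pairwise_append]
          exact ⟨h2, List.pairwise_singleton _ _,
            fun a ha b hb => (List.mem_singleton.mp hb) ▸ hnone a ha⟩
        obtain ⟨g1, g2, g3⟩ := ih (ans ++ [PySem.Set.ofList item]) h1' h2'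
        refine ⟨g1, g2, fun S => ?_⟩
        rw [g3 S]
        constructor
        · rintro (⟨x, hx, hcx⟩ | ⟨it, hit, hP⟩)
          · rcases List.mem_append.mp hx with h | h
            · exact Or.inl ⟨x, h, hcx⟩
            · rw [List.mem_singleton.mp h] at hcx
              exact Or.inr ⟨item, List.mem_cons_self, hlen, hcx⟩
          · exact Or.inr ⟨it, List.mem_cons_of_mem _ hit, hP⟩
        · rintro (⟨x, hx, hcx⟩ | ⟨it, hit, hP⟩)
          · exact Or.inl ⟨x, List.mem_append_left _ hx, hcx⟩
          · rcases List.mem_cons.mp hit with rfl | hit'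
            · exact Or.inl ⟨PySem.Set.ofList it, List.mem_append_right _ (List.mem_singleton.mpr rfl), hP.2⟩
            · exact Or.inr ⟨it, hit', hP⟩
      · rw [if_neg hc]
        obtain ⟨g1, g2, g3⟩ := ih ans h1 h2
        refine ⟨g1, g2, fun S => ?_⟩
        rw [g3 S]
        have habsorb : (PySem.Set.ofList item).length = N →
            canonS (PySem.Set.ofList item) = S → ∃ x ∈ ans, canonS x = S := by
          intro hlen hcS
          have hany : (ans.any (fun t => PySem.Set.equal t (PySem.Set.ofList item))) = true := by
            by_cases h : (ans.any (fun t => PySem.Set.equal t (PySem.Set.ofList item))) = true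
            · exact h
            · exfalso
              apply hc
              rw [Bool.and_eq_true]
              rw [Bool.not_eq_true] at h
              exact ⟨beq_iff_eq.mpr hlen, by simp [h]⟩
          obtain ⟨t, ht, heq⟩ := List.any_eq_true.mp hany
          have hp := (equal_iff_perm _ _ (h1 t ht) (PySem.Set.nodup_ofList item)).mp heq
          refine ⟨t, ht, ?_⟩
          rw [← hcS]
          exact (canonS_eq_iff _ _).mpr hp
        constructor
        · rintro (h | ⟨it, hit, hP⟩)
          · exact Or.inl h
          · exact Or.inr ⟨it, List.mem_cons_of_mem _ hit, hP⟩
        · rintro (h | ⟨it, hit, hP⟩)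
          · exact Or.inl h
          · rcases List.mem_cons.mp hit with rfl | hit'
            · exact Or.inl (habsorb hP.1 hP.2)
            · exact Or.inr ⟨it, hit', hP⟩

-- B's DFS: the result set stays duplicate-free
theorem dfsB_nodup (cands : List (List String)) :
    ∀ used res, res.Nodup → (dfsB cands used res).Nodup := by
  induction cands with
  | nil =>
      intro used res h
      simpa [dfsB] using PySem.Set.nodup_add res (PySem.List.sorted used (fun x => x) false) h
  | cons c rest ih =>
      intro used res h
      simp only [dfsB]
      induction c generalizing res with
      | nil => simpa using h
      | cons u c' ihc =>
          simp only [List.foldl_cons]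
          apply ihc
          by_cases hm : u ∈ used
          · simpa [hm] using h
          · simpa [hm] using ih (used ++ [u]) res h

-- B's DFS: membership characterisation
theorem dfsB_mem (cands : List (List String)) :
    ∀ used res, used.Nodup → ∀ S,
      S ∈ dfsB cands used res ↔ S ∈ res ∨
        ∃ t, Pick cands t ∧ (used ++ t).Nodup ∧ canonS (used ++ t) = S := by
  induction cands with
  | nil =>
      intro used res hu S
      simp [dfsB, PySem.Set.mem_add, Pick, List.forall₂_nil_right_iff, hu, canonS, eq_comm]
  | cons c rest ih =>
      intro used res hu S
      simp only [dfsB]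
      have hfold : ∀ (cs : List String) (r : PySem.Set (List String)),
          S ∈ cs.foldl (fun r u => if u ∈ used then r else dfsB rest (used ++ [u]) r) r ↔
          S ∈ r ∨ ∃ u ∈ cs, ∃ t, Pick rest t ∧ ((used ++ [u]) ++ t).Nodup ∧
            canonS ((used ++ [u]) ++ t) = S := by
        intro cs
        induction cs with
        | nil => intro r; simp
        | cons u cs' ihc =>
            intro r
            simp only [List.foldl_cons]
            rw [ihc]
            by_cases hm : u ∈ used
            · simp only [if_pos hm]
              constructor
              · rintro (h | ⟨v, hv, t, hp, hn, hc⟩)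
                · exact Or.inl h
                · exact Or.inr ⟨v, List.mem_cons_of_mem _ hv, t, hp, hn, hc⟩
              · rintro (h | ⟨v, hv, t, hp, hn, hc⟩)
                · exact Or.inl h
                · rcases List.mem_cons.mp hv with rfl | hv'
                  · exact absurd hm (not_mem_of_nodup_snoc used v hn.of_append_left)
                  · exact Or.inr ⟨v, hv', t, hp, hn, hc⟩
            · simp only [if_neg hm]
              rw [ih (used ++ [u]) r (nodup_snoc used u hu hm) S]
              constructor
              · rintro (((h | ⟨t, hp, hn, hc⟩) | ⟨v, hv, t, hp, hn, hc⟩))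
                · exact Or.inl h
                · exact Or.inr ⟨u, List.mem_cons_self, t, hp, hn, hc⟩
                · exact Or.inr ⟨v, List.mem_cons_of_mem _ hv, t, hp, hn, hc⟩
              · rintro (h | ⟨v, hv, t, hp, hn, hc⟩)
                · exact Or.inl (Or.inl h)
                · rcases List.mem_cons.mp hv with rfl | hv'
                  · exact Or.inl (Or.inr ⟨t, hp, hn, hc⟩)
                  · exact Or.inr ⟨v, hv', t, hp, hn, hc⟩
      rw [hfold c res]
      apply or_congr_right
      constructor
      · rintro ⟨u, hu', t, hp, hn, hc⟩
        refine ⟨u :: t, List.Forall₂.cons hu' hp, ?_, ?_⟩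
        · rwa [List.append_cons]
        · rwa [List.append_cons]
      · rintro ⟨t', hp, hn, hc⟩
        rcases List.forall₂_cons_right_iff.mp hp with ⟨u, t, hu', hpt, rfl⟩
        rw [List.append_cons] at hn hc
        exact ⟨u, hu', t, hpt, hn, hc⟩

-- ===== VERDICT (by name: the statement is the Claim_ definition above) =====
theorem solution_spec : Claim_equal_solution := by
  intro user_id banned_id _
  unfold Spec_solution
  simp only [solution, solution_alt, PySem.List.foldl_append_singleton_eq_map,
    PySem.List.foldl_append_if_eq_filter, List.nil_append, List.map_id']
  set cands := banned_id.map (fun ban => List.filter (fun user => matchBan user ban) user_id)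
    with hcands
  have hcl : cands.length = banned_id.length := by rw [hcands, List.length_map]
  obtain ⟨h1, h2, h3⟩ :=
    Afold_invariant banned_id.length (pyProduct cands) [] (by simp) (by simp)
  have hrn : (dfsB cands [] []).Nodup := dfsB_nodup cands [] [] (by simp)
  have hmemB := dfsB_mem cands [] [] (by simp)
  set answer := (pyProduct cands).foldl (fun ans item =>
      let s := PySem.Set.ofList item
      if s.length == banned_id.length && !(ans.any (fun t => PySem.Set.equal t s))
      then ans ++ [s] else ans) [] with hanswer
  have hmem : ∀ S, S ∈ answer.map canonS ↔ S ∈ dfsB cands [] [] := by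
    intro S
    rw [List.mem_map]
    have hB := hmemB S
    simp only [List.not_mem_nil, false_or, List.nil_append] at hB
    rw [hB]
    have hA := h3 S
    simp only [List.not_mem_nil, false_and, exists_const, false_or] at hA
    constructor
    · rintro ⟨x, hx, hcx⟩
      obtain ⟨item, hit, hlen, hcS⟩ := hA.mp ⟨x, hx, hcx⟩
      have hp := (mem_pyProduct cands item).mp hit
      have hl : item.length = banned_id.length := by rw [List.Forall₂.length_eq hp, hcl]
      have hnd : item.Nodup := nodup_of_ofList_length item (by rw [hlen, hl])
      have he : PySem.Set.ofList item = item := PySem.Set.ofList_eq_self_of_nodup item hnd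
      rw [he] at hcS
      exact ⟨item, hp, hnd, hcS⟩
    · rintro ⟨t, hp, hnd, hcS⟩
      apply hA.mpr
      have he : PySem.Set.ofList t = t := PySem.Set.ofList_eq_self_of_nodup t hnd
      refine ⟨t, (mem_pyProduct cands t).mpr hp, ?_, ?_⟩
      · rw [he, List.Forall₂.length_eq hp, hcl]
      · rw [he]; exact hcS
  have hmn : (answer.map canonS).Nodup := by
    exact List.Pairwise.map canonS
      (fun {a b} h heq => h ((canonS_eq_iff a b).mp heq)) h2
  have hperm : (answer.map canonS).Perm (dfsB cands [] []) :=
    (List.perm_ext_iff_of_nodup hmn hrn).mpr hmem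
  have hlens := hperm.length_eq
  rw [List.length_map] at hlens
  exact_mod_cast hlens
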